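-- pv_equiv track=rewrite | github.com/QuHarmonics/Nexus-4-Framework-Recursive-Harmonic-Architecture | Python Code - Raw Dump/Nexus 4 Framework -SHA SOLVED-checkpoint-code_63- Qu Harmonics.py | simulate_hash_operations
-- ===== SOURCE A (Python) =====
-- def simulate_hash_operations(input_data):
--     # Convert the input string to a list of bytes
--     input_bytes = list(input_data.encode('utf-8'))
--
--     # Initialize registers and memory
--     eax, ebx, edx, esi, esp, edi = 0, 0, 0, 0, 0, 0
--     memory = [0] * 256  # Simulated memory
--
--     # Example: Perform cyclic XOR and AND operations
--     for i, byte in enumerate(input_bytes):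
--         eax ^= byte  # XOR with EAX
--         memory[i] = eax & 0xFF  # AND result, store in memory
--
--         esi ^= memory[i]  # XOR with ESI
--         esp ^= memory[i]  # XOR with ESP
--         eax &= 0xFF  # Apply AND to EAX
--
--     # Construct the "unfolded" data
--     unfolded_data = bytes(memory[:len(input_bytes)]).decode('utf-8', errors='replace')
--     return unfolded_data
-- ===== SOURCE B (Python) =====
-- def simulate_hash_operations(input_data):
--     def scan(seg):
--         # divide-and-conquer prefix-XOR: scan each half independently,
--         # then fold the left half's total XOR into the right half's results
--         if len(seg) <= 1:
--             return list(seg)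
--         mid = len(seg) // 2
--         left = scan(seg[:mid])
--         right = scan(seg[mid:])
--         t = left[-1]
--         return left + [t ^ x for x in right]
--     return bytes(scan(input_data.encode('utf-8'))).decode('utf-8', errors='replace')
-- ===== Notes on version B (the rewrite author's own statement) =====
-- stated objective: alternative
-- what changed: Replaces A's sequential index loop with its eax accumulator, 256-slot memory, dead registers and no-op & 0xFF masks by a recursive divide-and-conquer prefix-XOR scan: each half is scanned independently and the left half's total XOR is folded into the right half's results, correct because XOR is associative.
import Mathlib
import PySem

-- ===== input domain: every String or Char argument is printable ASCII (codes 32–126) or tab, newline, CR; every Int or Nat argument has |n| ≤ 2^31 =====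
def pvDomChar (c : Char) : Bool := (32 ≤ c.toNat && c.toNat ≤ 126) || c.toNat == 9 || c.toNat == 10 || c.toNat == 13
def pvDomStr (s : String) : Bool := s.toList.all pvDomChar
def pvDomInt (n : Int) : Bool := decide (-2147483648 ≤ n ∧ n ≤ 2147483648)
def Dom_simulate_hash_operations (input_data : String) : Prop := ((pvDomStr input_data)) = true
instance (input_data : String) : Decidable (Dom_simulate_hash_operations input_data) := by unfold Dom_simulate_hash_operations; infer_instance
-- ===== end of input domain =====

-- B replaces A's sequential accumulator loop over a 256-slot memory (with dead registers and
-- no-op & 0xFF masks) by a divide-and-conquer prefix-XOR scan (objective: alternative);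
-- return values agree on all admitted inputs.

-- ===== PORT A =====
-- input_data.encode('utf-8'): exact on the ASCII domain (every admitted char has code < 128,
-- so UTF-8 encoding is the identity on code points).
def pvEncodeA (input_data : String) : List Int :=
  input_data.toList.map (fun c => (c.toNat : Int))

-- one iteration of A's for-loop; state = (eax, esi, esp, memory).
-- memory[i] = v: i is the nonnegative enumerate index; List.set i.toNat v is exact while
-- i < 256 (Pre_ excludes longer inputs, where Python raises IndexError).
def pvStepA (s : Int × Int × Int × List Int) (p : Int × Int) : Int × Int × Int × List Int :=
  let eax := PySem.Int.bxor s.1 p.2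
  let mem := s.2.2.2.set p.1.toNat (PySem.Int.band eax 255)
  let m := mem.getD p.1.toNat 0
  let esi := PySem.Int.bxor s.2.1 m
  let esp := PySem.Int.bxor s.2.2.1 m
  (PySem.Int.band eax 255, esi, esp, mem)

-- bytes(...).decode('utf-8', errors='replace'): exact here because every stored byte is an
-- XOR of ASCII bytes, hence < 128, so the bytes are valid UTF-8 (ASCII) and decode is identity.
def pvDecodeA (bs : List Int) : String :=
  String.mk (bs.map (fun b => Char.ofNat b.toNat))

def simulate_hash_operations (input_data : String) : String :=
  pvDecodeA (PySem.List.slice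
    (((PySem.List.enumerate (pvEncodeA input_data)).foldl pvStepA
        (0, 0, 0, List.replicate 256 0)).2.2.2)
    none (some ((pvEncodeA input_data).length : Int)))

-- ===== PORT B =====
-- Source B's recursive 'scan': halves via seg[:mid] / seg[mid:], left's total (left[-1], always
-- defined since left is nonempty here — exact as getLastD 0) folded into the right half.
def pvScanDC (seg : List Int) : List Int :=
  if h : seg.length ≤ 1 then seg
  else
    let mid := seg.length / 2
    let left := pvScanDC (seg.take mid)
    let right := pvScanDC (seg.drop mid)
    let t := left.getLastD 0
    left ++ right.map (fun x => PySem.Int.bxor t x)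
termination_by seg.length
decreasing_by
  · simp; omega
  · simp; omega

-- encode / decode: same exactness notes as on A's side.
def simulate_hash_operations_alt (input_data : String) : String :=
  String.mk ((pvScanDC (input_data.toList.map (fun c => (c.toNat : Int)))).map
    (fun b => Char.ofNat b.toNat))

-- ===== PRECONDITION & SPEC =====
-- A writes memory[i] into a fixed 256-entry list, so it raises IndexError as soon as the
-- encoded input has more than 256 bytes; exactly those inputs are excluded.
def Pre_simulate_hash_operations (input_data : String) : Prop :=
  input_data.toList.length ≤ 256
instance (input_data : String) : Decidable (Pre_simulate_hash_operations input_data) := by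
  unfold Pre_simulate_hash_operations; infer_instance

def pvWitness_simulate_hash_operations : String := "abc"

def Spec_simulate_hash_operations (input_data : String) (out : String) : Prop :=
  out = simulate_hash_operations_alt input_data
instance (input_data : String) (out : String) : Decidable (Spec_simulate_hash_operations input_data out) := by unfold Spec_simulate_hash_operations; infer_instance

-- ===== CLAIM (what is proved, stated in full; the proofs are below) =====
def Claim_equal_simulate_hash_operations : Prop := ∀ (input_data : String), Dom_simulate_hash_operations input_data → Pre_simulate_hash_operations input_data → Spec_simulate_hash_operations input_data (simulate_hash_operations input_data)


-- ===== LEMMAS AND PROOFS =====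

-- proof-side characterization: the running-XOR prefix both programs compute
def prefixXor (acc : Int) : List Int → List Int
  | [] => []
  | b :: bs => let a := PySem.Int.bxor acc b; a :: prefixXor a bs

-- XOR of two bytes < 128 stays in [0, 128)
lemma bxor_lt (a b : Int) (ha : 0 ≤ a ∧ a < 128) (hb : 0 ≤ b ∧ b < 128) :
    0 ≤ PySem.Int.bxor a b ∧ PySem.Int.bxor a b < 128 := by
  obtain ⟨m, rfl⟩ := Int.eq_ofNat_of_zero_le ha.1
  obtain ⟨n, rfl⟩ := Int.eq_ofNat_of_zero_le hb.1
  rw [PySem.Int.bxor_natCast]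
  have : m ^^^ n < 128 := Nat.xor_lt_two_pow (n := 7) (by omega) (by omega)
  constructor <;> omega

-- masking a value in [0, 256) with 0xFF is the identity
lemma band_255 (a : Int) (ha : 0 ≤ a) (hb : a < 256) : PySem.Int.band a 255 = a := by
  obtain ⟨m, rfl⟩ := Int.eq_ofNat_of_zero_le ha
  have : (255 : Int) = ((255 : Nat) : Int) := rfl
  rw [this, PySem.Int.band_natCast]
  have : m &&& 255 = m % 256 := Nat.and_two_pow_sub_one_eq_mod m 8
  have : m &&& 255 = m := by omega
  simp [this]

lemma bxor_zero_left (b : Int) : PySem.Int.bxor 0 b = b := by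
  rw [PySem.Int.bxor_comm, PySem.Int.bxor_zero]

lemma bxor_assoc' (a b c : Int) (ha : 0 ≤ a) (hb : 0 ≤ b) (hc : 0 ≤ c) :
    PySem.Int.bxor (PySem.Int.bxor a b) c = PySem.Int.bxor a (PySem.Int.bxor b c) := by
  obtain ⟨m, rfl⟩ := Int.eq_ofNat_of_zero_le ha
  obtain ⟨n, rfl⟩ := Int.eq_ofNat_of_zero_le hb
  obtain ⟨k, rfl⟩ := Int.eq_ofNat_of_zero_le hc
  simp [PySem.Int.bxor_natCast, Nat.xor_assoc]

-- A's loop, started at index k with accumulator eax < 128, rewrites exactly the k-th through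
-- (k+|bs|-1)-th memory cells with the running-XOR prefix prefixXor eax bs.
lemma loopA (bs : List Int) (hb : ∀ b ∈ bs, 0 ≤ b ∧ b < 128) :
    ∀ (k : Nat) (eax esi esp : Int) (mem : List Int),
      0 ≤ eax → eax < 128 → k + bs.length ≤ mem.length →
      ((PySem.List.enumerate bs (k : Int)).foldl pvStepA (eax, esi, esp, mem)).2.2.2
        = mem.take k ++ prefixXor eax bs ++ mem.drop (k + bs.length) := by
  induction bs with
  | nil =>
    intro k eax esi esp mem _ _ _
    simp [PySem.List.enumerate_nil, prefixXor]
  | cons b bs ih =>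
    intro k eax esi esp mem h0 h1 hlen
    have hb' := hb b (List.mem_cons_self ..)
    have hx : 0 ≤ PySem.Int.bxor eax b ∧ PySem.Int.bxor eax b < 128 :=
      bxor_lt eax b ⟨h0, h1⟩ hb'
    have hmask : PySem.Int.band (PySem.Int.bxor eax b) 255 = PySem.Int.bxor eax b :=
      band_255 _ hx.1 (by omega)
    have hklt : k < mem.length := by simp at hlen; omega
    rw [PySem.List.enumerate_cons, List.foldl_cons]
    have hstep : pvStepA (eax, esi, esp, mem) ((k : Int), b)
        = (PySem.Int.bxor eax b,
           PySem.Int.bxor esi (PySem.Int.bxor eax b),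
           PySem.Int.bxor esp (PySem.Int.bxor eax b),
           mem.set k (PySem.Int.bxor eax b)) := by
      simp [pvStepA, hmask, List.getD, hklt]
    rw [hstep]
    have : ((k : Int) + 1) = ((k + 1 : Nat) : Int) := by push_cast; ring
    rw [this, ih (fun b hbm => hb b (List.mem_cons_of_mem _ hbm)) (k + 1) _ _ _ _
          hx.1 hx.2 (by simp at hlen ⊢; omega)]
    rw [List.set_eq_take_cons_drop _ hklt]
    have hlk : (mem.take k).length = k := by simp [hklt.le]
    rw [List.take_append, List.drop_append, hlk]
    have t1 : (mem.take k).take (k + 1) = mem.take k := List.take_of_length_le (by omega)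
    have t2 : ((PySem.Int.bxor eax b) :: mem.drop (k + 1)).take (k + 1 - k) = [PySem.Int.bxor eax b] := by
      have h : k + 1 - k = 1 := by omega
      simp [h]
    have t3 : (mem.take k).drop (k + 1 + bs.length) = [] := List.drop_of_length_le (by omega)
    have t4 : ((PySem.Int.bxor eax b) :: mem.drop (k + 1)).drop (k + 1 + bs.length - k)
        = mem.drop (k + (bs.length + 1)) := by
      have h : k + 1 + bs.length - k = bs.length + 1 := by omega
      rw [h, List.drop_succ_cons, List.drop_drop]
      congr 1
      omega
    rw [t1, t2, t3, t4]
    simp [prefixXor]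

lemma length_prefixXor (acc : Int) (bs : List Int) : (prefixXor acc bs).length = bs.length := by
  induction bs generalizing acc with
  | nil => simp [prefixXor]
  | cons b bs ih => simp [prefixXor, ih]

-- every element of prefixXor acc bs is nonneg when acc and the bytes are
lemma prefixXor_nonneg (acc : Int) (bs : List Int) (ha : 0 ≤ acc) (hb : ∀ b ∈ bs, 0 ≤ b) :
    ∀ x ∈ prefixXor acc bs, 0 ≤ x := by
  induction bs generalizing acc with
  | nil => simp [prefixXor]
  | cons b bs ih =>
    intro x hx
    have hb' : 0 ≤ b := hb b (List.mem_cons_self ..)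
    have hxa : 0 ≤ PySem.Int.bxor acc b := by
      obtain ⟨m, rfl⟩ := Int.eq_ofNat_of_zero_le ha
      obtain ⟨n, rfl⟩ := Int.eq_ofNat_of_zero_le hb'
      simp [PySem.Int.bxor_natCast]
    simp only [prefixXor, List.mem_cons] at hx
    rcases hx with rfl | hx
    · exact hxa
    · exact ih _ hxa (fun b hbm => hb b (List.mem_cons_of_mem _ hbm)) x hx

-- shifting the starting accumulator XORs every prefix value (nonneg inputs)
lemma prefixXor_shift (a : Int) (ha : 0 ≤ a) :
    ∀ (c : Int) (bs : List Int), 0 ≤ c → (∀ b ∈ bs, 0 ≤ b) →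
      prefixXor (PySem.Int.bxor a c) bs = (prefixXor c bs).map (fun x => PySem.Int.bxor a x) := by
  intro c bs
  induction bs generalizing c with
  | nil => intro _ _; simp [prefixXor]
  | cons b bs ih =>
    intro hc hb
    have hb' : 0 ≤ b := hb b (List.mem_cons_self ..)
    simp only [prefixXor, List.map_cons]
    rw [bxor_assoc' a c b ha hc hb',
      ih (PySem.Int.bxor c b) (by
        obtain ⟨m, rfl⟩ := Int.eq_ofNat_of_zero_le hc
        obtain ⟨n, rfl⟩ := Int.eq_ofNat_of_zero_le hb'
        simp [PySem.Int.bxor_natCast])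
        (fun b hbm => hb b (List.mem_cons_of_mem _ hbm))]

-- splitting the list splits the scan, restarting at the left part's last value
lemma prefixXor_append (l r : List Int) :
    ∀ (a : Int), prefixXor a (l ++ r)
      = prefixXor a l ++ prefixXor ((prefixXor a l).getLastD a) r := by
  induction l with
  | nil => intro a; simp [prefixXor]
  | cons b l ih =>
    intro a
    simp only [List.cons_append, prefixXor, List.getLastD_cons]
    rw [ih (PySem.Int.bxor a b)]

-- B's divide-and-conquer scan computes the running-XOR prefix from 0
lemma scanDC_eq (seg : List Int) (hb : ∀ b ∈ seg, 0 ≤ b) :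
    pvScanDC seg = prefixXor 0 seg := by
  induction hn : seg.length using Nat.strong_induction_on generalizing seg with
  | _ n ih =>
    rw [pvScanDC]
    split
    · rename_i h
      match seg, h with
      | [], _ => simp [prefixXor]
      | [b], _ => simp [prefixXor, bxor_zero_left]
    · rename_i h
      have h2 : 2 ≤ seg.length := by omega
      have hmid : 1 ≤ seg.length / 2 ∧ seg.length / 2 < seg.length := by omega
      set mid := seg.length / 2 with hmiddef
      have hltake : (seg.take mid).length = mid := by simp; omega
      have hldrop : (seg.drop mid).length = seg.length - mid := by simp
      have hbl : ∀ b ∈ seg.take mid, 0 ≤ b := fun b hbm => hb b (List.mem_of_mem_take hbm)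
      have hbr : ∀ b ∈ seg.drop mid, 0 ≤ b := fun b hbm => hb b (List.mem_of_mem_drop hbm)
      show pvScanDC (seg.take mid) ++ (pvScanDC (seg.drop mid)).map
          (fun x => PySem.Int.bxor ((pvScanDC (seg.take mid)).getLastD 0) x) = prefixXor 0 seg
      rw [ih _ (by subst hn; omega) _ hbl hltake,
          ih _ (by subst hn; omega) _ hbr hldrop]
      have hl0 : 0 ≤ (prefixXor 0 (seg.take mid)).getLastD 0 := by
        rcases h' : prefixXor 0 (seg.take mid) with _ | ⟨x, xs⟩
        · simp
        · have := prefixXor_nonneg 0 (seg.take mid) le_rfl hbl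
          rw [h'] at this
          have hmem : (x :: xs).getLastD 0 ∈ x :: xs := by
            rw [List.getLastD_eq_getLast?, List.getLast?_eq_some_getLast (by simp)]
            exact List.getLast_mem _
          exact this _ hmem
      have := prefixXor_shift ((prefixXor 0 (seg.take mid)).getLastD 0) hl0 0 (seg.drop mid)
        le_rfl hbr
      rw [PySem.Int.bxor_zero] at this
      rw [← this]
      conv_rhs => rw [← List.take_append_drop mid seg]
      rw [prefixXor_append]

-- ===== VERDICT (by name: the statement is the Claim_ definition above) =====
theorem simulate_hash_operations_spec : Claim_equal_simulate_hash_operations := by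
  intro input_data hdom hpre
  unfold Spec_simulate_hash_operations simulate_hash_operations simulate_hash_operations_alt
    pvDecodeA
  have hb : ∀ b ∈ pvEncodeA input_data, 0 ≤ b ∧ b < 128 := by
    intro b hbm
    simp only [pvEncodeA, List.mem_map] at hbm
    obtain ⟨c, hc, rfl⟩ := hbm
    have hdc : pvDomChar c = true := by
      unfold Dom_simulate_hash_operations pvDomStr at hdom
      exact List.all_eq_true.mp hdom c hc
    simp [pvDomChar] at hdc
    omega
  have hlen : (pvEncodeA input_data).length = input_data.toList.length := by
    simp [pvEncodeA]
  have hloop := loopA (pvEncodeA input_data) hb 0 0 0 0 (List.replicate 256 0)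
    le_rfl (by norm_num)
    (by rw [List.length_replicate]; unfold Pre_simulate_hash_operations at hpre; omega)
  simp only [Nat.cast_zero, List.take_zero, Nat.zero_add, List.nil_append] at hloop
  rw [hloop, PySem.List.slice_to_natCast,
    List.take_append_of_le_length (le_of_eq (length_prefixXor 0 (pvEncodeA input_data)).symm),
    List.take_of_length_le (le_of_eq (length_prefixXor 0 (pvEncodeA input_data))),
    show (input_data.toList.map (fun c => (c.toNat : Int))) = pvEncodeA input_data from rfl,
    scanDC_eq (pvEncodeA input_data) (fun b hbm => (hb b hbm).1)]
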